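-- pv_equiv track=rewrite | github.com/santkumar/diya | software/gui/create_image.py | well_pos_to_led_pos_24
-- ===== SOURCE A (Python) =====
-- def well_pos_to_led_pos_24(well_pos, TL):
--     led_pos_x = []
--     led_pos_y = []
--     leds_pos = []
--
--     for i in range(5):
--         led_pos_temp = well_pos[1]*6+TL[well_pos[0]][0]+i
--         led_pos_y.append(led_pos_temp)
--     for i in range(5):
--         led_pos_temp = well_pos[2]*6+TL[well_pos[0]][1]+i
--         led_pos_x.append(led_pos_temp)
--
--     for x in range(5):
--         led = None
--         if x == 0 or x == 4:
--             for y in range(3):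
--                 led = (led_pos_x[x], led_pos_y[y+1])
--                 leds_pos.append(led)
--         else:
--             for y in range(5):
--                 led = (led_pos_x[x], led_pos_y[y])
--                 leds_pos.append(led)
--
--     return leds_pos
-- ===== SOURCE B (Python) =====
-- _SHAPE = [(0, 1), (0, 2), (0, 3)] \
--     + [(dx, dy) for dx in (1, 2, 3) for dy in range(5)] \
--     + [(4, 1), (4, 2), (4, 3)]
--
--
-- def well_pos_to_led_pos_24(well_pos, TL):
--     base_y = well_pos[1] * 6 + TL[well_pos[0]][0]
--     base_x = well_pos[2] * 6 + TL[well_pos[0]][1]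
--     return [(base_x + dx, base_y + dy) for dx, dy in _SHAPE]
-- ===== Notes on version B (the rewrite author's own statement) =====
-- stated objective: simpler
-- what changed: Replaced the three index loops and the led_pos_x/led_pos_y intermediate arrays with a constant (dx,dy) offset table for the LED shape mapped once over a base coordinate.
import Mathlib
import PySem

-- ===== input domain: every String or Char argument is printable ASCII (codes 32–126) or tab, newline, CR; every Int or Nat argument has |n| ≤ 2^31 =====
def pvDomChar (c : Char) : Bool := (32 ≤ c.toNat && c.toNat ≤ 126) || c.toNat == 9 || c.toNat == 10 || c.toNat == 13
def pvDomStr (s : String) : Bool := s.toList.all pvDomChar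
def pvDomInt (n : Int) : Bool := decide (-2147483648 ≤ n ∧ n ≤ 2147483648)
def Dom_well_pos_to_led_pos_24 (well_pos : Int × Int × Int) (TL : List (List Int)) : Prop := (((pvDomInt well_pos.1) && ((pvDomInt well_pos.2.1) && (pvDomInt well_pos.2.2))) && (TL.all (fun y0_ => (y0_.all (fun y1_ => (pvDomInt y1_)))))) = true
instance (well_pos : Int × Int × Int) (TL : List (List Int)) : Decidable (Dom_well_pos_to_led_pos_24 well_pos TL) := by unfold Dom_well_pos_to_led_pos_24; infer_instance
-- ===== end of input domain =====

-- B replaces the three index loops and intermediate coordinate arrays with a constant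
-- (dx,dy) offset table for the LED shape mapped once over a base coordinate (simpler).


-- ===== PORT A =====
def well_pos_to_led_pos_24 (well_pos : Int × Int × Int) (TL : List (List Int)) : List (Int × Int) :=
  match PySem.List.pyGet? TL well_pos.1 with
  | none => []  -- IndexError in Python; excluded by Pre_
  | some row =>
    match PySem.List.pyGet? row 0, PySem.List.pyGet? row 1 with
    | some t0, some t1 =>
    -- for i in range(5): led_pos_y.append(well_pos[1]*6+TL[well_pos[0]][0]+i)
    let led_pos_y : List Int :=
      (List.range 5).foldl (fun acc i => acc ++ [well_pos.2.1 * 6 + t0 + (i : Int)]) []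
    -- for i in range(5): led_pos_x.append(well_pos[2]*6+TL[well_pos[0]][1]+i)
    let led_pos_x : List Int :=
      (List.range 5).foldl (fun acc i => acc ++ [well_pos.2.2 * 6 + t1 + (i : Int)]) []
    -- the x/y emission loops
    (List.range 5).foldl (fun acc x =>
      if x == 0 || x == 4 then
        (List.range 3).foldl (fun acc2 y =>
          acc2 ++ [(led_pos_x.getD x 0, led_pos_y.getD (y + 1) 0)]) acc
      else
        (List.range 5).foldl (fun acc2 y =>
          acc2 ++ [(led_pos_x.getD x 0, led_pos_y.getD y 0)]) acc) []
    | _, _ => []  -- IndexError in Python; excluded by Pre_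

-- ===== PORT B =====
-- the LED shape: 5x5 grid minus the four corners, in emission order
def ledShape : List (Int × Int) :=
  [(0, 1), (0, 2), (0, 3),
   (1, 0), (1, 1), (1, 2), (1, 3), (1, 4),
   (2, 0), (2, 1), (2, 2), (2, 3), (2, 4),
   (3, 0), (3, 1), (3, 2), (3, 3), (3, 4),
   (4, 1), (4, 2), (4, 3)]

def well_pos_to_led_pos_24_alt (well_pos : Int × Int × Int) (TL : List (List Int)) : List (Int × Int) :=
  -- (none anywhere = IndexError in Python; those inputs are excluded by Pre_)
  ((PySem.List.pyGet? TL well_pos.1).bind (fun row =>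
    (PySem.List.pyGet? row 0).bind (fun t0 =>
      (PySem.List.pyGet? row 1).map (fun t1 =>
        let base_y := well_pos.2.1 * 6 + t0
        let base_x := well_pos.2.2 * 6 + t1
        ledShape.map (fun p => (base_x + p.1, base_y + p.2)))))).getD []

-- ===== PRECONDITION & SPEC =====
-- Pre_ excludes exactly the inputs where Python A raises IndexError
-- (well_pos[0] out of range for TL, or the selected row shorter than 2).
def Pre_well_pos_to_led_pos_24 (well_pos : Int × Int × Int) (TL : List (List Int)) : Prop :=
  (PySem.List.pyGet? TL well_pos.1).any (fun row => decide (2 ≤ row.length)) = true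
instance (well_pos : Int × Int × Int) (TL : List (List Int)) : Decidable (Pre_well_pos_to_led_pos_24 well_pos TL) := by unfold Pre_well_pos_to_led_pos_24; infer_instance

def pvWitness_well_pos_to_led_pos_24 : (Int × Int × Int) × List (List Int) :=
  ((0, 1, 2), [[3, 4]])

def Spec_well_pos_to_led_pos_24 (well_pos : Int × Int × Int) (TL : List (List Int)) (out : List (Int × Int)) : Prop := out = well_pos_to_led_pos_24_alt well_pos TL
instance (well_pos : Int × Int × Int) (TL : List (List Int)) (out : List (Int × Int)) : Decidable (Spec_well_pos_to_led_pos_24 well_pos TL out) := by unfold Spec_well_pos_to_led_pos_24; infer_instance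

-- ===== CLAIM (what is proved, stated in full; the proofs are below) =====
def Claim_equal_well_pos_to_led_pos_24 : Prop := ∀ (well_pos : Int × Int × Int) (TL : List (List Int)), Dom_well_pos_to_led_pos_24 well_pos TL → Pre_well_pos_to_led_pos_24 well_pos TL → Spec_well_pos_to_led_pos_24 well_pos TL (well_pos_to_led_pos_24 well_pos TL)

-- ===== LEMMAS AND PROOFS =====

-- ===== VERDICT (by name: the statement is the Claim_ definition above) =====
theorem well_pos_to_led_pos_24_spec : Claim_equal_well_pos_to_led_pos_24 := by
  intro wp TL _ hpre
  unfold Pre_well_pos_to_led_pos_24 at hpre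
  unfold Spec_well_pos_to_led_pos_24
  unfold well_pos_to_led_pos_24 well_pos_to_led_pos_24_alt
  cases hrow : PySem.List.pyGet? TL wp.1 with
  | none => rw [hrow] at hpre; simp [Option.any] at hpre
  | some row =>
    rw [hrow] at hpre
    simp [Option.any] at hpre
    rcases row with _ | ⟨r0, _ | ⟨r1, rest⟩⟩ <;> simp at hpre
    have h01 : (0:Int) ≤ (rest.length:Int) + 1 := by omega
    simp [PySem.List.pyGet?, PySem.List.pyIdx?, List.range_succ, ledShape, h01]
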